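-- pv_equiv track=rewrite | github.com/mostafazadeceo/filament-3 | kyc_defense/doc_forensics.py | summarize_exif
-- ===== SOURCE A (Python) =====
-- from typing import Dict, List, Optional, Tuple
--
-- def summarize_exif(exif: Dict[str, str]) -> Dict[str, Optional[str]]:
--     """Return a normalized subset of EXIF tags."""
--
--     keys = [
--         "Make",
--         "Model",
--         "Software",
--         "ProcessingSoftware",
--         "DateTimeOriginal",
--         "CreateDate",
--         "ModifyDate",
--         "DateTime",
--         "Orientation",
--         "Artist",
--         "GPSInfo",
--     ]
--     summary: Dict[str, Optional[str]] = {}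
--     for key in keys:
--         if key in exif:
--             summary[key] = exif.get(key)
--     return summary
-- ===== SOURCE B (Python) =====
-- from typing import Dict, List, Optional, Tuple
--
--
-- def summarize_exif(exif: Dict[str, str]) -> Dict[str, Optional[str]]:
--     """Return a normalized subset of EXIF tags."""
--
--     rank = {k: i for i, k in enumerate((
--         "Make",
--         "Model",
--         "Software",
--         "ProcessingSoftware",
--         "DateTimeOriginal",
--         "CreateDate",
--         "ModifyDate",
--         "DateTime",
--         "Orientation",
--         "Artist",
--         "GPSInfo",
--     ))}
--     found = [(rank[k], k, v) for k, v in exif.items() if k in rank]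
--     found.sort(key=lambda t: t[0])
--     return {k: v for _, k, v in found}
-- ===== Notes on version B (the rewrite author's own statement) =====
-- stated objective: alternative
-- what changed: B drives a single pass over the input dict, tagging each known tag with its precomputed rank, then sorts by rank to restore the canonical key order, instead of A's loop over the fixed key list probing the input for each key.
import Mathlib
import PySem

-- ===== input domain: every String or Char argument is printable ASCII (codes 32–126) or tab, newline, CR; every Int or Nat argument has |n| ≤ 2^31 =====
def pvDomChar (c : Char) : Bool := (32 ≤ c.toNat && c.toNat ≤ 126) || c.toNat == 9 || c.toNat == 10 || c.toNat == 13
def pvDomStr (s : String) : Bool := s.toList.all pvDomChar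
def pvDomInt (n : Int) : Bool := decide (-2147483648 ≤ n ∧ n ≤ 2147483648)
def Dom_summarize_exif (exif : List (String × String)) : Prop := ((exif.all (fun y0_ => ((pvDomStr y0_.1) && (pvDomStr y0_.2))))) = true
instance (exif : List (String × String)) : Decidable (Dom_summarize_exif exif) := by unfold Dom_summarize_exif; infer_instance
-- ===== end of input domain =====

-- B replaces A's probe-each-known-key loop by one tagging pass over the input followed by a
-- sort by precomputed rank (alternative algorithm, same cost); equivalence is on the return value.

-- ===== PORT A =====
def keysA : List String :=
  ["Make", "Model", "Software", "ProcessingSoftware", "DateTimeOriginal",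
   "CreateDate", "ModifyDate", "DateTime", "Orientation", "Artist", "GPSInfo"]

def summarize_exif (exif : List (String × String)) : List (String × Option String) :=
  let exifD := PySem.Dict.mk exif
  (keysA.foldl (fun summary key =>
      if exifD.contains key then summary.insert key (exifD.get? key) else summary)
    PySem.Dict.empty).items

-- ===== PORT B =====
-- B enumerates the same literal tag list (keysA) into a rank dict.
def rankB : PySem.Dict String Int :=
  (PySem.List.enumerate keysA).foldl (fun d p => d.insert p.2 p.1) PySem.Dict.empty

def summarize_exif_alt (exif : List (String × String)) : List (String × Option String) :=
  let found := exif.filterMap (fun p =>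
    match rankB.get? p.1 with
    | some r => some (r, p.1, p.2)
    | none => none)
  let sortedF := PySem.List.sorted found (fun t => t.1) false
  sortedF.map (fun t => (t.2.1, some t.2.2))

-- ===== PRECONDITION & SPEC =====
-- Pre_ excludes association lists with duplicate keys: they represent no Python dict input
-- (a Python dict cannot hold a key twice), so first-vs-last-match behaviour there is accidental.
def Pre_summarize_exif (exif : List (String × String)) : Prop := (exif.map Prod.fst).Nodup
instance (exif : List (String × String)) : Decidable (Pre_summarize_exif exif) := by
  unfold Pre_summarize_exif; infer_instance

def pvWitness_summarize_exif : (List (String × String)) :=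
  [("Make", "Canon"), ("Foo", "1"), ("GPSInfo", "g")]

def Spec_summarize_exif (exif : List (String × String)) (out : List (String × Option String)) : Prop := out = summarize_exif_alt exif
instance (exif : List (String × String)) (out : List (String × Option String)) : Decidable (Spec_summarize_exif exif out) := by unfold Spec_summarize_exif; infer_instance

-- ===== CLAIM (what is proved, stated in full; the proofs are below) =====
def Claim_equal_summarize_exif : Prop := ∀ (exif : List (String × String)), Dom_summarize_exif exif → Pre_summarize_exif exif → Spec_summarize_exif exif (summarize_exif exif)

-- ===== LEMMAS AND PROOFS =====

-- The canonical result: the known entries of exif in key-list order.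
def pvP (exif : List (String × String)) : List (Int × String × String) :=
  (PySem.List.enumerate keysA).filterMap (fun p =>
    match (PySem.Dict.mk exif).get? p.2 with
    | some v => some (p.1, p.2, v)
    | none => none)

-- A's fold over fresh distinct keys appends one item per present key.
lemma foldA_items (d : PySem.Dict String String) :
    ∀ (ks : List String) (s : PySem.Dict String (Option String)),
      ks.Nodup → (∀ k ∈ ks, s.contains k = false) →
      (ks.foldl (fun summary key =>
          if d.contains key then summary.insert key (d.get? key) else summary) s).items
        = s.items ++ ks.filterMap (fun k =>
            if d.contains k then some (k, d.get? k) else none) := by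
  intro ks
  induction ks with
  | nil => intro s _ _; simp
  | cons k ks ih =>
    intro s hnd hfresh
    simp only [List.foldl_cons, List.filterMap_cons]
    rcases List.nodup_cons.mp hnd with ⟨hk, hnd'⟩
    cases hc : d.contains k with
    | true =>
      simp only [if_true]
      rw [ih (s.insert k (d.get? k)) hnd' ?_]
      · rw [PySem.Dict.items_insert_of_not_contains _ _ (hfresh k (by simp))]
        simp
      · intro a ha
        have hne : a ≠ k := fun h => hk (h ▸ ha)
        rw [PySem.Dict.contains_insert]
        simp [hne, hfresh a (by simp [ha])]
    | false =>
      simp only [Bool.false_eq_true, if_false]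
      exact ih s hnd' (fun a ha => hfresh a (by simp [ha]))


lemma A_eq_filterMap (exif : List (String × String)) :
    summarize_exif exif
      = (PySem.List.enumerate keysA).filterMap (fun p =>
          match (PySem.Dict.mk exif).get? p.2 with
          | some v => some (p.2, some v)
          | none => none) := by
  unfold summarize_exif
  rw [foldA_items (PySem.Dict.mk exif) keysA PySem.Dict.empty (by decide)
      (by intro k _; rfl)]
  have hk : keysA = (PySem.List.enumerate keysA).map (·.2) := by decide
  conv_lhs => rw [hk]
  rw [List.filterMap_map]
  simp only [PySem.Dict.empty, List.nil_append]
  apply List.filterMap_congr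
  intro p _
  simp only [Function.comp]
  rw [PySem.Dict.contains_eq_isSome_get?]
  cases (PySem.Dict.mk exif).get? p.2 <;> simp

-- rank lookup in the dict built from an enumerated nodup key list
lemma rank_get_iff :
    ∀ (ks : List String) (s : Int) (d : PySem.Dict String Int), ks.Nodup →
      (∀ a ∈ ks, d.contains a = false) → ∀ (k : String) (r : Int),
      ((PySem.List.enumerate ks s).foldl (fun d p => d.insert p.2 p.1) d).get? k = some r ↔
        ((r, k) ∈ PySem.List.enumerate ks s ∨ (d.get? k = some r ∧ k ∉ ks)) := by
  intro ks
  induction ks with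
  | nil => intro s d _ _ k r; simp [PySem.List.enumerate]
  | cons a ks ih =>
    intro s d hnd hfresh k r
    rcases List.nodup_cons.mp hnd with ⟨hak, hnd'⟩
    rw [PySem.List.enumerate_cons]
    simp only [List.foldl_cons, List.mem_cons]
    have hfresh' : ∀ b ∈ ks, (d.insert a s).contains b = false := by
      intro b hb
      rw [PySem.Dict.contains_insert]
      have : b ≠ a := fun h => hak (h ▸ hb)
      simp [this, hfresh b (by simp [hb])]
    rw [ih (s + 1) (d.insert a s) hnd' hfresh' k r]
    have hmemk : ∀ r' : Int, (r', k) ∈ PySem.List.enumerate ks (s + 1) → k ∈ ks := by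
      intro r' hmem
      rcases (PySem.List.mem_enumerate_iff ks (s + 1) (r', k)).mp hmem with ⟨j, hj, hjeq⟩
      simp only [Prod.mk.injEq] at hjeq
      exact hjeq.2 ▸ List.getElem_mem hj
    by_cases hka : k = a
    · subst hka
      rw [PySem.Dict.get?_insert_self]
      constructor
      · rintro (hmem | ⟨hget, hnot⟩)
        · exact absurd (hmemk r hmem) hak
        · rw [Option.some_inj] at hget
          exact Or.inl (Or.inl (by rw [hget]))
      · rintro ((h | h) | ⟨hg, hn⟩)
        · have hr : r = s := by simpa using congrArg Prod.fst h
          exact Or.inr ⟨by rw [hr], hak⟩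
        · exact absurd (hmemk r h) hak
        · exact absurd (Or.inl rfl) hn
    · rw [PySem.Dict.get?_insert_of_ne _ _ hka]
      constructor
      · rintro (hmem | ⟨hget, hnot⟩)
        · exact Or.inl (Or.inr hmem)
        · exact Or.inr ⟨hget, by simp [hka, hnot]⟩
      · rintro ((h | h) | ⟨hg, hn⟩)
        · exact absurd (congrArg Prod.snd h) hka
        · exact Or.inl h
        · exact Or.inr ⟨hg, fun hmem => hn (Or.inr hmem)⟩

lemma rankB_get_iff (k : String) (r : Int) :
    rankB.get? k = some r ↔ (r, k) ∈ PySem.List.enumerate keysA := by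
  unfold rankB
  rw [rank_get_iff keysA 0 PySem.Dict.empty (by decide) (by intro a _; rfl)]
  simp [PySem.Dict.get?_empty]

lemma mkget_iff (exif : List (String × String)) (h : Pre_summarize_exif exif)
    (k : String) (v : String) :
    (PySem.Dict.mk exif).get? k = some v ↔ (k, v) ∈ exif := by
  have hnd : (PySem.Dict.mk exif).keys.Nodup := h
  constructor
  · intro hg; exact PySem.Dict.mem_items_of_get?_eq_some _ hg
  · intro hm; exact PySem.Dict.get?_of_mem_items _ hm hnd

lemma mem_P_iff (exif : List (String × String)) (h : Pre_summarize_exif exif)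
    (x : Int × String × String) :
    x ∈ pvP exif ↔ ((x.1, x.2.1) ∈ PySem.List.enumerate keysA ∧ x.2 ∈ exif) := by
  unfold pvP
  rw [List.mem_filterMap]
  constructor
  · rintro ⟨p, hp, hfx⟩
    cases hget : (PySem.Dict.mk exif).get? p.2 with
    | none => simp [hget] at hfx
    | some v =>
      simp only [hget] at hfx
      cases hfx
      exact ⟨hp, (mkget_iff exif h _ _).mp hget⟩
  · rintro ⟨hp, hm⟩
    refine ⟨(x.1, x.2.1), hp, ?_⟩
    rw [(mkget_iff exif h _ _).mpr (by simpa using hm)]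

lemma mem_found_iff (exif : List (String × String)) (x : Int × String × String) :
    x ∈ exif.filterMap (fun p =>
        match rankB.get? p.1 with
        | some r => some (r, p.1, p.2)
        | none => none)
      ↔ ((x.1, x.2.1) ∈ PySem.List.enumerate keysA ∧ x.2 ∈ exif) := by
  rw [List.mem_filterMap]
  constructor
  · rintro ⟨p, hp, hfx⟩
    cases hget : rankB.get? p.1 with
    | none => simp [hget] at hfx
    | some r =>
      simp only [hget] at hfx
      cases hfx
      exact ⟨(rankB_get_iff _ _).mp hget, hp⟩
  · rintro ⟨hp, hm⟩
    refine ⟨x.2, hm, ?_⟩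
    rw [(rankB_get_iff x.2.1 x.1).mpr hp]

lemma P_pairwise (exif : List (String × String)) :
    (pvP exif).Pairwise (fun a b => a.1 < b.1) := by
  unfold pvP
  refine List.Pairwise.filterMap _ ?_ (PySem.List.pairwise_lt_enumerate keysA 0)
  intro a b hab x hx y hy
  cases hga : (PySem.Dict.mk exif).get? a.2 <;> simp [hga] at hx
  cases hgb : (PySem.Dict.mk exif).get? b.2 <;> simp [hgb] at hy
  simp [← hx, ← hy, hab]

lemma found_nodup (exif : List (String × String)) (h : Pre_summarize_exif exif) :
    (exif.filterMap (fun p =>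
        match rankB.get? p.1 with
        | some r => some (r, p.1, p.2)
        | none => none)).Nodup := by
  have hpw : exif.Pairwise (fun p q => p.1 ≠ q.1) := by
    exact List.pairwise_map.mp h
  refine List.Pairwise.imp (fun h12 => h12) ?_
  refine List.Pairwise.filterMap _ ?_ hpw
  intro a b hab x hx y hy
  cases hga : rankB.get? a.1 <;> simp [hga] at hx
  cases hgb : rankB.get? b.1 <;> simp [hgb] at hy
  intro hxy
  apply hab
  rw [← hx, ← hy] at hxy
  exact congrArg (fun t => t.2.1) hxy

lemma sorted_found_eq_P (exif : List (String × String)) (h : Pre_summarize_exif exif) :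
    PySem.List.sorted (exif.filterMap (fun p =>
        match rankB.get? p.1 with
        | some r => some (r, p.1, p.2)
        | none => none)) (fun t => t.1) false = pvP exif := by
  apply PySem.List.sorted_eq_of_perm_of_pairwise_lt
  · apply (List.perm_ext_iff_of_nodup ?_ ?_).mpr
    · intro x
      rw [mem_P_iff exif h, mem_found_iff exif]
    · exact List.Pairwise.imp (fun hlt => by
        intro he; exact absurd (congrArg (fun t => t.1) he) (by exact ne_of_lt hlt))
        (P_pairwise exif)
    · exact found_nodup exif h
  · exact P_pairwise exif

-- ===== VERDICT (by name: the statement is the Claim_ definition above) =====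
theorem summarize_exif_spec : Claim_equal_summarize_exif := by
  intro exif _ hpre
  unfold Spec_summarize_exif
  show summarize_exif exif
    = (PySem.List.sorted (exif.filterMap (fun p =>
        match rankB.get? p.1 with
        | some r => some (r, p.1, p.2)
        | none => none)) (fun t => t.1) false).map (fun t => (t.2.1, some t.2.2))
  rw [sorted_found_eq_P exif hpre, A_eq_filterMap exif]
  unfold pvP
  rw [List.map_filterMap]
  apply List.filterMap_congr
  intro p _
  cases (PySem.Dict.mk exif).get? p.2 <;> simp
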